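-- pv_equiv track=rewrite | github.com/Roflaff/codeTest | baekjoon/1047/1047.py | find_remove_tree
-- ===== SOURCE A (Python) =====
-- def find_max_x(spot, N: int):
--     max_index = 0
--     temp = spot[0][0]
--     for i in range(N):
--         if spot[i][0] > temp:
--             temp = spot[i][0]
--             max_index = i
--
--     return max_index
--
-- def find_max_y(spot, N: int):
--     max_index = 0
--     temp = spot[0][1]
--     for i in range(N):
--         if spot[i][1] > temp:
--             temp = spot[i][1]
--             max_index = i
--
--     return max_index
--
-- def find_min_x(spot, N: int):
--     min_index = 0
--     temp = spot[0][0]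
--     for i in range(N):
--         if spot[i][0] < temp:
--             temp = spot[i][0]
--             min_index = i
--
--     return min_index
--
-- def find_min_y(spot, N: int):
--     min_index = 0
--     temp = spot[0][1]
--     for i in range(N):
--         if spot[i][1] < temp:
--             temp = spot[i][1]
--             min_index = i
--
--     return min_index
--
-- def find_total_len(max_x, max_y, min_x, min_y):
--     w = max_x - min_x
--     h = max_y - min_y
--     return 2 * (w + h)
--
-- def find_remove_tree(spot, len, N):
--
--     # 사용 가능한 나무 길이
--     total_tree_len = 0
--
--     for i in range(N):
--         total_tree_len += len[i]
--
--     max_x = find_max_x(spot=spot, N=N)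
--     max_y = find_max_y(spot=spot, N=N)
--     min_x = find_min_x(spot=spot, N=N)
--     min_y = find_min_y(spot=spot, N=N)
--
--     total_len = find_total_len(
--         max_x=spot[max_x][0],
--         max_y=spot[max_y][1],
--         min_x=spot[min_x][0],
--         min_y=spot[min_y][1]
--     )
--
--     if total_tree_len < total_len:
--         return False
--     else:
--         return True
-- ===== SOURCE B (Python) =====
-- def find_remove_tree(spot, len, N):
--     total_tree_len = 0
--     max_x = min_x = spot[0][0]
--     max_y = min_y = spot[0][1]
--     for i in range(N):
--         total_tree_len += len[i]
--         x, y = spot[i]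
--         if x > max_x:
--             max_x = x
--         if x < min_x:
--             min_x = x
--         if y > max_y:
--             max_y = y
--         if y < min_y:
--             min_y = y
--     return total_tree_len >= 2 * ((max_x - min_x) + (max_y - min_y))
-- ===== Notes on version B (the rewrite author's own statement) =====
-- stated objective: simpler
-- what changed: Replaces A's four index-finding helper loops plus a separate summing loop (five passes, indices looked up again afterwards) by one pass that accumulates the length sum and the running max/min coordinate values directly.
import Mathlib
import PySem

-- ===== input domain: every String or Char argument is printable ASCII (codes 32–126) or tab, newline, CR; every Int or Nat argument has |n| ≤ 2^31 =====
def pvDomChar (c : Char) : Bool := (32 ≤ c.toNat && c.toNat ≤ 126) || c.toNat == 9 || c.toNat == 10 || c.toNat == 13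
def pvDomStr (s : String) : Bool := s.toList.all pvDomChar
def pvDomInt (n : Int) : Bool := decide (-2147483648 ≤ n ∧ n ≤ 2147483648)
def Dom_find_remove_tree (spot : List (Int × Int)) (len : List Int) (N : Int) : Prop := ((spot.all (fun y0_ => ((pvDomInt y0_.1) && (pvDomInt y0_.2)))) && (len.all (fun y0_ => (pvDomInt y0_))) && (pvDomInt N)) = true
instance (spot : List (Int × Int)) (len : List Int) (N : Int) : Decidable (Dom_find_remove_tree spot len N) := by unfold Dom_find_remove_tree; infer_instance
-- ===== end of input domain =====

-- B replaces A's five separate passes (a summing loop plus four index-finding helpers whose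
-- indices are looked up again) by one pass accumulating the sum and the extreme coordinate
-- values directly (objective: simpler).

-- ===== PORT A =====
-- out-of-range lookups (impossible inside Pre_) default to 0 / (0,0); Python raises there.
def find_max_x (spot : List (Int × Int)) (N : Int) : Int :=
  (((PySem.List.pyRange 0 N 1).foldl (fun (st : Int × Int) i =>
      if ((PySem.List.pyGet? spot i).getD (0,0)).1 > st.1
      then (((PySem.List.pyGet? spot i).getD (0,0)).1, i) else st)
    (((PySem.List.pyGet? spot 0).getD (0,0)).1, 0))).2

def find_max_y (spot : List (Int × Int)) (N : Int) : Int :=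
  (((PySem.List.pyRange 0 N 1).foldl (fun (st : Int × Int) i =>
      if ((PySem.List.pyGet? spot i).getD (0,0)).2 > st.1
      then (((PySem.List.pyGet? spot i).getD (0,0)).2, i) else st)
    (((PySem.List.pyGet? spot 0).getD (0,0)).2, 0))).2

def find_min_x (spot : List (Int × Int)) (N : Int) : Int :=
  (((PySem.List.pyRange 0 N 1).foldl (fun (st : Int × Int) i =>
      if ((PySem.List.pyGet? spot i).getD (0,0)).1 < st.1
      then (((PySem.List.pyGet? spot i).getD (0,0)).1, i) else st)
    (((PySem.List.pyGet? spot 0).getD (0,0)).1, 0))).2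

def find_min_y (spot : List (Int × Int)) (N : Int) : Int :=
  (((PySem.List.pyRange 0 N 1).foldl (fun (st : Int × Int) i =>
      if ((PySem.List.pyGet? spot i).getD (0,0)).2 < st.1
      then (((PySem.List.pyGet? spot i).getD (0,0)).2, i) else st)
    (((PySem.List.pyGet? spot 0).getD (0,0)).2, 0))).2

def find_total_len (max_x max_y min_x min_y : Int) : Int :=
  let w := max_x - min_x
  let h := max_y - min_y
  2 * (w + h)

def find_remove_tree (spot : List (Int × Int)) (len : List Int) (N : Int) : Bool :=
  let total_tree_len := (PySem.List.pyRange 0 N 1).foldl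
      (fun t i => t + (PySem.List.pyGet? len i).getD 0) 0
  let max_x := find_max_x spot N
  let max_y := find_max_y spot N
  let min_x := find_min_x spot N
  let min_y := find_min_y spot N
  let total_len := find_total_len
      (((PySem.List.pyGet? spot max_x).getD (0,0)).1)
      (((PySem.List.pyGet? spot max_y).getD (0,0)).2)
      (((PySem.List.pyGet? spot min_x).getD (0,0)).1)
      (((PySem.List.pyGet? spot min_y).getD (0,0)).2)
  if total_tree_len < total_len then false else true

-- ===== PORT B =====
def find_remove_tree_alt (spot : List (Int × Int)) (len : List Int) (N : Int) : Bool :=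
  let x0 := ((PySem.List.pyGet? spot 0).getD (0,0)).1
  let y0 := ((PySem.List.pyGet? spot 0).getD (0,0)).2
  let st := (PySem.List.pyRange 0 N 1).foldl
    (fun (st : Int × Int × Int × Int × Int) i =>
      let total := st.1 + (PySem.List.pyGet? len i).getD 0
      let p := (PySem.List.pyGet? spot i).getD (0,0)
      (total,
       if p.1 > st.2.1 then p.1 else st.2.1,
       if p.1 < st.2.2.1 then p.1 else st.2.2.1,
       if p.2 > st.2.2.2.1 then p.2 else st.2.2.2.1,
       if p.2 < st.2.2.2.2 then p.2 else st.2.2.2.2))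
    (0, x0, x0, y0, y0)
  decide (st.1 ≥ 2 * ((st.2.1 - st.2.2.1) + (st.2.2.2.1 - st.2.2.2.2)))

-- ===== PRECONDITION & SPEC =====
-- Pre_ excludes exactly the inputs where Python A raises IndexError: empty spot (spot[0] in
-- every helper) or N exceeding the length of spot or of len.
def Pre_find_remove_tree (spot : List (Int × Int)) (len : List Int) (N : Int) : Prop :=
  spot ≠ [] ∧ N ≤ (spot.length : Int) ∧ N ≤ (len.length : Int)
instance (spot : List (Int × Int)) (len : List Int) (N : Int) : Decidable (Pre_find_remove_tree spot len N) := by unfold Pre_find_remove_tree; infer_instance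
def pvWitness_find_remove_tree : (List (Int × Int)) × List Int × Int := ([((1 : Int), (2 : Int))], [(3 : Int)], (1 : Int))

def Spec_find_remove_tree (spot : List (Int × Int)) (len : List Int) (N : Int) (out : Bool) : Prop := out = find_remove_tree_alt spot len N
instance (spot : List (Int × Int)) (len : List Int) (N : Int) (out : Bool) : Decidable (Spec_find_remove_tree spot len N out) := by unfold Spec_find_remove_tree; infer_instance

-- ===== CLAIM (what is proved, stated in full; the proofs are below) =====
def Claim_equal_find_remove_tree : Prop := ∀ (spot : List (Int × Int)) (len : List Int) (N : Int), Dom_find_remove_tree spot len N → Pre_find_remove_tree spot len N → Spec_find_remove_tree spot len N (find_remove_tree spot len N)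

-- ===== LEMMAS AND PROOFS =====

-- A's index-tracking fold: its value component follows the value-only fold, and the value at
-- the tracked index is that value.
theorem idx_fold_inv (look : Int → Int) (better : Int → Int → Prop) [DecidableRel better] (l : List Int) :
    ∀ (t j : Int), t = look j →
      (l.foldl (fun (st : Int × Int) i =>
          if better (look i) st.1 then (look i, i) else st) (t, j)).1
        = l.foldl (fun acc i => if better (look i) acc then look i else acc) t
      ∧ look ((l.foldl (fun (st : Int × Int) i =>
          if better (look i) st.1 then (look i, i) else st) (t, j)).2)
        = (l.foldl (fun (st : Int × Int) i =>
          if better (look i) st.1 then (look i, i) else st) (t, j)).1 := by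
  induction l with
  | nil => intro t j h; simpa using h.symm
  | cons i l ih =>
      intro t j h
      by_cases hb : better (look i) t
      · simpa [List.foldl, hb] using ih (look i) i rfl
      · simpa [List.foldl, hb] using ih t j h

-- B's five-component fold decomposes into five independent folds.
theorem fold5_decomp (spot : List (Int × Int)) (len : List Int) (l : List Int) :
    ∀ (st : Int × Int × Int × Int × Int),
      l.foldl (fun (st : Int × Int × Int × Int × Int) i =>
        let total := st.1 + (PySem.List.pyGet? len i).getD 0
        let p := (PySem.List.pyGet? spot i).getD (0,0)
        (total,
         if p.1 > st.2.1 then p.1 else st.2.1,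
         if p.1 < st.2.2.1 then p.1 else st.2.2.1,
         if p.2 > st.2.2.2.1 then p.2 else st.2.2.2.1,
         if p.2 < st.2.2.2.2 then p.2 else st.2.2.2.2)) st
      = (l.foldl (fun t i => t + (PySem.List.pyGet? len i).getD 0) st.1,
         l.foldl (fun acc i => if ((PySem.List.pyGet? spot i).getD (0,0)).1 > acc then ((PySem.List.pyGet? spot i).getD (0,0)).1 else acc) st.2.1,
         l.foldl (fun acc i => if ((PySem.List.pyGet? spot i).getD (0,0)).1 < acc then ((PySem.List.pyGet? spot i).getD (0,0)).1 else acc) st.2.2.1,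
         l.foldl (fun acc i => if ((PySem.List.pyGet? spot i).getD (0,0)).2 > acc then ((PySem.List.pyGet? spot i).getD (0,0)).2 else acc) st.2.2.2.1,
         l.foldl (fun acc i => if ((PySem.List.pyGet? spot i).getD (0,0)).2 < acc then ((PySem.List.pyGet? spot i).getD (0,0)).2 else acc) st.2.2.2.2) := by
  induction l with
  | nil => intro st; rfl
  | cons i l ih => intro st; simpa [List.foldl] using ih _

theorem find_remove_tree_agree (spot : List (Int × Int)) (len : List Int) (N : Int) :
    find_remove_tree spot len N = find_remove_tree_alt spot len N := by
  simp only [find_remove_tree, find_remove_tree_alt, find_max_x, find_max_y, find_min_x,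
    find_min_y, find_total_len, fold5_decomp]
  obtain ⟨hmx1, hmx2⟩ := idx_fold_inv
    (fun i => ((PySem.List.pyGet? spot i).getD (0,0)).1) (fun a b => a > b)
    (PySem.List.pyRange 0 N 1) (((PySem.List.pyGet? spot 0).getD (0,0)).1) 0 rfl
  obtain ⟨hmy1, hmy2⟩ := idx_fold_inv
    (fun i => ((PySem.List.pyGet? spot i).getD (0,0)).2) (fun a b => a > b)
    (PySem.List.pyRange 0 N 1) (((PySem.List.pyGet? spot 0).getD (0,0)).2) 0 rfl
  obtain ⟨hnx1, hnx2⟩ := idx_fold_inv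
    (fun i => ((PySem.List.pyGet? spot i).getD (0,0)).1) (fun a b => a < b)
    (PySem.List.pyRange 0 N 1) (((PySem.List.pyGet? spot 0).getD (0,0)).1) 0 rfl
  obtain ⟨hny1, hny2⟩ := idx_fold_inv
    (fun i => ((PySem.List.pyGet? spot i).getD (0,0)).2) (fun a b => a < b)
    (PySem.List.pyRange 0 N 1) (((PySem.List.pyGet? spot 0).getD (0,0)).2) 0 rfl
  simp only [hmx2, hmy2, hnx2, hny2, hmx1, hmy1, hnx1, hny1]
  have key : ∀ T L : Int, (if T < L then false else true) = decide (T ≥ L) := by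
    intro T L
    by_cases h : T < L
    · have h2 : ¬ (T ≥ L) := by omega
      simp [h, h2]
    · have h2 : T ≥ L := by omega
      simp [h, h2]
  exact key _ _

-- ===== VERDICT (by name: the statement is the Claim_ definition above) =====
theorem find_remove_tree_spec : Claim_equal_find_remove_tree := by
  intro spot len N _ _
  exact find_remove_tree_agree spot len N
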